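-- pv_equiv track=rewrite | github.com/embydextrous/Interview | stack/31-aPatternPrintingQuestion.py | findMinimumNumber
-- ===== SOURCE A (Python) =====
-- def findMinimumNumber(a):
--     result = ""
--     current = 1
--     i = 0
--     while i < len(a):
--         c = a[i]
--         if c == 'I':
--             result = result + str(current)
--             current += 1
--         else:
--             dCount = 0
--             j = i
--             while j < len(a) and a[j] == 'D':
--                 dCount += 1
--                 j += 1
--             k = current + dCount
--             for y in range(k, current - 1, -1):
--                 result = result + str(y)
--             current = k + 1
--         i = current - 1
--     if i == len(a):
--         result += str(current)
--     return result
-- ===== SOURCE B (Python) =====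
-- def findMinimumNumber(a):
--     result = []
--     stack = []
--     for i in range(len(a) + 1):
--         stack.append(i + 1)
--         if i == len(a) or a[i] != 'D':
--             while stack:
--                 result.append(str(stack.pop()))
--     return "".join(result)
-- ===== Notes on version B (the rewrite author's own statement) =====
-- stated objective: simpler
-- what changed: Replaces A's index-jumping run counter (inner while counting D's, a countdown for-loop, and i recomputed from current) with a single pass that pushes i+1 on a stack and flushes it LIFO at every non-'D' position and at the end.
import Mathlib
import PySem

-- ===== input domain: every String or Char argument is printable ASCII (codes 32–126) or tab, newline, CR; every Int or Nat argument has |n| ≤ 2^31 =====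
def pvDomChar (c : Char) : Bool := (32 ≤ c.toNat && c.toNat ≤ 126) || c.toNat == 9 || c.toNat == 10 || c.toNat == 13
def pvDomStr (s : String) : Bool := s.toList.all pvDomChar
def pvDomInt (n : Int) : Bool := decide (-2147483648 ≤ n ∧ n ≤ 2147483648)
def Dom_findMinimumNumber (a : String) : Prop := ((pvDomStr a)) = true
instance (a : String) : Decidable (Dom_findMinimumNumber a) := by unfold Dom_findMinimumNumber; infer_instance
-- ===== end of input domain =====

-- B replaces A's index-jumping run counter (inner while over D's, a countdown for-loop,
-- i recomputed from current) with a single left-to-right pass pushing i+1 on a stack that is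
-- flushed LIFO at every non-'D' position and at the end; objective: simpler.

-- ===== PORT A =====

-- inner `while j < len(a) and a[j] == 'D'` loop; fuel only makes the recursion total
-- (the real loop increments j towards len(a)), it is never exhausted at the call site.
def pvDCountA (s : List Char) (fuel : Nat) (dCount j : Int) : Int :=
  match fuel with
  | 0 => dCount
  | f + 1 =>
    if j < (s.length : Int) ∧ PySem.List.pyGet? s j = some 'D' then
      pvDCountA s f (dCount + 1) (j + 1)
    else dCount

-- outer `while i < len(a)` loop, followed by the trailing `if i == len(a)` check;
-- fuel only makes the recursion total (i strictly increases each iteration).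
def pvLoopA (s : List Char) (fuel : Nat) (result : List Char) (current i : Int) : List Char :=
  match fuel with
  | 0 => result
  | f + 1 =>
    if i < (s.length : Int) then
      match PySem.List.pyGet? s i with
      | none => result  -- unreachable: in every reachable state 0 ≤ i < len(a)
      | some c =>
        if c = 'I' then
          pvLoopA s f (result ++ (PySem.Int.toStr current).toList) (current + 1) ((current + 1) - 1)
        else
          let dCount := pvDCountA s (s.length + 1) 0 i
          let k := current + dCount
          let result2 := (PySem.List.pyRange k (current - 1) (-1)).foldl
            (fun r y => r ++ (PySem.Int.toStr y).toList) result
          pvLoopA s f result2 (k + 1) ((k + 1) - 1)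
    else if i = (s.length : Int) then result ++ (PySem.Int.toStr current).toList
    else result

def findMinimumNumber (a : String) : String :=
  String.ofList (pvLoopA a.toList (a.toList.length + 1) [] 1 0)

-- ===== PORT B =====

-- `while stack: result.append(str(stack.pop()))` (stack top = list head)
def pvFlush (result : List String) (stack : List Int) : List String :=
  match stack with
  | [] => result
  | v :: rest => pvFlush (result ++ [PySem.Int.toStr v]) rest

-- body of `for i in range(len(a) + 1)`
def pvStepB (s : List Char) (st : List String × List Int) (i : Nat) : List String × List Int :=
  let stack := ((i : Int) + 1) :: st.2
  if i = s.length ∨ PySem.List.pyGet? s (i : Int) ≠ some 'D' then (pvFlush st.1 stack, [])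
  else (st.1, stack)

def findMinimumNumber_alt (a : String) : String :=
  let s := a.toList
  let r := (List.range (s.length + 1)).foldl (pvStepB s) ([], [])
  PySem.Str.join "" r.1

-- ===== PRECONDITION & SPEC =====
def Spec_findMinimumNumber (a : String) (out : String) : Prop := out = findMinimumNumber_alt a
instance (a : String) (out : String) : Decidable (Spec_findMinimumNumber a out) := by unfold Spec_findMinimumNumber; infer_instance

-- ===== CLAIM (what is proved, stated in full; the proofs are below) =====
def Claim_equal_findMinimumNumber : Prop := ∀ (a : String), Dom_findMinimumNumber a → Spec_findMinimumNumber a (findMinimumNumber a)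

-- ===== LEMMAS AND PROOFS =====

-- length of the maximal run of 'D' starting at position i
def pvRunD (s : List Char) (i : Nat) : Nat :=
  if h : s[i]? = some 'D' then pvRunD s (i + 1) + 1 else 0
termination_by s.length - i
decreasing_by
  have : i < s.length := (List.getElem?_eq_some_iff.mp h).1
  omega

-- pvDesc lo n = [lo + n, lo + n - 1, …, lo]
def pvDesc (lo : Int) : Nat → List Int
  | 0 => [lo]
  | n + 1 => (lo + (n + 1 : Nat)) :: pvDesc lo n

-- the common specification: the numbers both programs emit from position i (with current = i+1)
def pvEmit (s : List Char) (i : Nat) : List Int :=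
  if i = s.length then [(i : Int) + 1]
  else if h : i < s.length then
    if s[i] = 'D' then pvDesc ((i : Int) + 1) (pvRunD s i) ++ pvEmit s (i + pvRunD s i + 1)
    else ((i : Int) + 1) :: pvEmit s (i + 1)
  else []
termination_by s.length + 1 - i
decreasing_by all_goals omega

def pvRender (l : List Int) : List Char := (l.map (fun v => (PySem.Int.toStr v).toList)).flatten

-- stack contents after pushing positions j, j+1, …, j+m-1 (top last): [j+m, …, j+1]
def pvStk : Nat → Nat → List Int
  | _, 0 => []
  | j, m + 1 => pvStk (j + 1) m ++ [(j : Int) + 1]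

theorem pvRunD_bound (s : List Char) (i : Nat) (h : i ≤ s.length) :
    i + pvRunD s i ≤ s.length := by
  unfold pvRunD
  split
  · rename_i hD
    have hi : i < s.length := (List.getElem?_eq_some_iff.mp hD).1
    have := pvRunD_bound s (i + 1) (by omega)
    omega
  · omega
termination_by s.length - i
decreasing_by
  have : i < s.length := (List.getElem?_eq_some_iff.mp ‹s[i]? = some 'D'›).1
  omega


theorem pvRunD_all (s : List Char) (i t : Nat) (ht : t < pvRunD s i) :
    s[i + t]? = some 'D' := by
  rw [pvRunD] at ht
  split at ht
  · rename_i hD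
    match t with
    | 0 => simpa using hD
    | t + 1 =>
      have := pvRunD_all s (i + 1) t (by omega)
      simpa [Nat.add_assoc, Nat.add_comm 1 t] using this
  · omega
termination_by s.length - i
decreasing_by
  have : i < s.length := (List.getElem?_eq_some_iff.mp ‹s[i]? = some 'D'›).1
  omega


theorem pvRunD_end (s : List Char) (i : Nat) (h : i + pvRunD s i < s.length) :
    ¬ s[i + pvRunD s i]? = some 'D' := by
  by_cases hD : s[i]? = some 'D'
  · rw [pvRunD, dif_pos hD] at h ⊢
    rw [show i + (pvRunD s (i + 1) + 1) = (i + 1) + pvRunD s (i + 1) by omega] at h ⊢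
    exact pvRunD_end s (i + 1) h
  · rw [pvRunD, dif_neg hD] at h ⊢
    simpa using hD
termination_by s.length - i
decreasing_by
  have : i < s.length := (List.getElem?_eq_some_iff.mp ‹s[i]? = some 'D'›).1
  omega

theorem pvDesc_snoc (lo : Int) (m : Nat) :
    pvDesc lo (m + 1) = pvDesc (lo + 1) m ++ [lo] := by
  induction m generalizing lo with
  | zero => simp [pvDesc]
  | succ n ih =>
    rw [show pvDesc lo (n + 1 + 1) = (lo + (n + 1 + 1 : Nat)) :: pvDesc lo (n + 1) from rfl, ih]
    rw [show pvDesc (lo + 1) (n + 1) = (lo + 1 + (n + 1 : Nat)) :: pvDesc (lo + 1) n from rfl]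
    simp only [List.cons_append, List.cons.injEq]
    exact ⟨by push_cast; ring, trivial⟩


theorem pvStk_desc (m : Nat) : ∀ j : Nat, ((j : Int) + 1 + m) :: pvStk j m = pvDesc ((j : Int) + 1) m := by
  induction m with
  | zero => intro j; simp [pvStk, pvDesc]
  | succ n ih =>
    intro j
    rw [show pvStk j (n + 1) = pvStk (j + 1) n ++ [(j : Int) + 1] from rfl]
    rw [pvDesc_snoc]
    have h2 : ((j : Int) + 1 + 1) = (((j + 1 : Nat) : Int) + 1) := by push_cast; ring
    rw [h2, ← ih (j + 1)]
    simp only [List.cons_append, List.cons.injEq]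
    exact ⟨by push_cast; ring, trivial⟩


theorem pvDCountA_eq (s : List Char) : ∀ (fuel j : Nat) (dc : Int),
    s.length - j ≤ fuel → pvDCountA s fuel dc (j : Int) = dc + (pvRunD s j : Int) := by
  intro fuel
  induction fuel with
  | zero =>
    intro j dc h
    rw [pvDCountA, pvRunD]
    have hj : s.length ≤ j := by omega
    rw [dif_neg]
    · simp
    · intro hD
      have := (List.getElem?_eq_some_iff.mp hD).1
      omega
  | succ f ih =>
    intro j dc h
    rw [pvDCountA, pvRunD]
    by_cases hD : s[j]? = some 'D'
    · have hj : j < s.length := (List.getElem?_eq_some_iff.mp hD).1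
      rw [if_pos ⟨by exact_mod_cast hj, by rw [PySem.List.pyGet?_natCast]; exact hD⟩, dif_pos hD]
      rw [show ((j : Int) + 1) = ((j + 1 : Nat) : Int) by push_cast; ring]
      rw [ih (j + 1) (dc + 1) (by omega)]
      push_cast; ring
    · rw [dif_neg hD, if_neg]
      · simp
      · rintro ⟨hj, hg⟩
        rw [PySem.List.pyGet?_natCast] at hg
        exact hD hg


theorem pvRange_desc (c : Int) (d : Nat) :
    PySem.List.pyRange (c + d) (c - 1) (-1) = pvDesc c d := by
  induction d with
  | zero =>
    rw [PySem.List.pyRange_neg_one_cons (by omega), PySem.List.pyRange_neg_one_eq_nil (by omega)]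
    simp [pvDesc]
  | succ n ih =>
    rw [PySem.List.pyRange_neg_one_cons (by push_cast; omega)]
    rw [show c + ((n + 1 : Nat) : Int) - 1 = c + (n : Int) by push_cast; ring]
    rw [ih]
    rfl


theorem pvFoldRender (l : List Int) (res : List Char) :
    l.foldl (fun r y => r ++ (PySem.Int.toStr y).toList) res = res ++ pvRender l := by
  induction l generalizing res with
  | nil => simp [pvRender]
  | cons x xs ih =>
    rw [List.foldl_cons, ih]
    simp [pvRender]


theorem pvFlush_eq (st : List Int) : ∀ res, pvFlush res st = res ++ st.map PySem.Int.toStr := by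
  induction st with
  | nil => intro res; simp [pvFlush]
  | cons v rest ih => intro res; rw [pvFlush, ih]; simp


theorem pvLoopA_eq (s : List Char) : ∀ (fuel i : Nat) (res : List Char),
    s.length + 1 - i ≤ fuel →
    pvLoopA s fuel res ((i : Int) + 1) (i : Int) = res ++ pvRender (pvEmit s i) := by
  intro fuel
  induction fuel with
  | zero =>
    intro i res h
    have hi : s.length < i := by omega
    rw [pvLoopA, pvEmit, if_neg (by omega), dif_neg (by omega)]
    simp [pvRender]
  | succ f ih =>
    intro i res h
    rcases lt_trichotomy i s.length with hi | hi | hi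
    · -- loop body runs
      have hget : PySem.List.pyGet? s (i : Int) = some s[i] := by
        rw [PySem.List.pyGet?_natCast]; exact List.getElem?_eq_getElem hi
      rw [pvLoopA]
      simp only [if_pos (show (i : Int) < (s.length : Int) by exact_mod_cast hi), hget]
      by_cases hI : s[i] = 'I'
      · -- 'I' branch of A
        rw [if_pos hI]
        have hE : pvEmit s i = ((i : Int) + 1) :: pvEmit s (i + 1) := by
          rw [pvEmit, if_neg (by omega), dif_pos hi, if_neg (by rw [hI]; decide)]
        rw [show ((i : Int) + 1 + 1 - 1) = (((i + 1 : Nat) : Int)) by push_cast; ring,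
            show ((i : Int) + 1 + 1) = (((i + 1 : Nat) : Int) + 1) by push_cast; ring]
        rw [ih (i + 1) _ (by omega), hE]
        simp [pvRender]
      · -- else branch of A (counts the run of 'D')
        rw [if_neg hI]
        have hd := pvDCountA_eq s (s.length + 1) i 0 (by omega)
        simp only [hd, zero_add]
        have hr : PySem.List.pyRange ((i : Int) + 1 + (pvRunD s i : Int)) (i : Int) (-1)
            = pvDesc ((i : Int) + 1) (pvRunD s i) := by
          have := pvRange_desc ((i : Int) + 1) (pvRunD s i)
          rw [show ((i : Int) + 1 - 1) = (i : Int) by ring] at this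
          exact this
        rw [show ((i : Int) + 1 - 1) = (i : Int) by ring, hr, pvFoldRender]
        rw [show ((i : Int) + 1 + (pvRunD s i : Nat) + 1 - 1) = (((i + pvRunD s i + 1 : Nat) : Int)) by push_cast; ring,
            show ((i : Int) + 1 + (pvRunD s i : Nat) + 1) = (((i + pvRunD s i + 1 : Nat) : Int) + 1) by push_cast; ring]
        rw [ih (i + pvRunD s i + 1) _ (by omega)]
        by_cases hD : s[i] = 'D'
        · have hE : pvEmit s i = pvDesc ((i : Int) + 1) (pvRunD s i) ++ pvEmit s (i + pvRunD s i + 1) := by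
            rw [pvEmit, if_neg (by omega), dif_pos hi, if_pos hD]
          rw [hE]
          simp [pvRender]
        · have h0 : pvRunD s i = 0 := by
            rw [pvRunD, dif_neg]
            rw [List.getElem?_eq_getElem hi]
            simp [hD]
          have hE : pvEmit s i = ((i : Int) + 1) :: pvEmit s (i + 1) := by
            rw [pvEmit, if_neg (by omega), dif_pos hi, if_neg hD]
          rw [h0] at *
          rw [hE]
          simp [pvRender, pvDesc]
    · -- i = len: trailing `if i == len(a)` appends current
      rw [pvLoopA, if_neg (by omega), if_pos (by exact_mod_cast hi)]
      rw [pvEmit, if_pos hi]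
      simp [pvRender]
    · -- i > len (reached after a trailing run of D's): nothing more is emitted
      rw [pvLoopA, if_neg (by omega), if_neg (by omega)]
      rw [pvEmit, if_neg (by omega), dif_neg (by omega)]
      simp [pvRender]

theorem pvRunB (s : List Char) : ∀ (m j : Nat) (st : List Int) (res : List String),
    j + m ≤ s.length → (∀ t, t < m → s[j + t]? = some 'D') →
    (List.range' j (s.length + 1 - j)).foldl (pvStepB s) (res, st) =
    (List.range' (j + m) (s.length + 1 - (j + m))).foldl (pvStepB s) (res, pvStk j m ++ st) := by
  intro m
  induction m with
  | zero => intro j st res _ _; simp [pvStk]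
  | succ n ih =>
    intro j st res hle hall
    have hj : j < s.length := by omega
    have hD : s[j]? = some 'D' := by simpa using hall 0 (by omega)
    rw [show s.length + 1 - j = (s.length - j) + 1 by omega, List.range'_succ, List.foldl_cons]
    have hstep : pvStepB s (res, st) j = (res, ((j : Int) + 1) :: st) := by
      rw [pvStepB, if_neg]
      rw [not_or, not_not]
      refine ⟨by omega, ?_⟩
      rw [PySem.List.pyGet?_natCast]
      simpa using hD
    rw [hstep]
    rw [show s.length - j = s.length + 1 - (j + 1) by omega]
    rw [ih (j + 1) (((j : Int) + 1) :: st) res (by omega)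
        (fun t ht => by rw [show j + 1 + t = j + (t + 1) by omega]; exact hall (t + 1) (by omega))]
    rw [show j + 1 + n = j + (n + 1) by omega]
    rw [show pvStk j (n + 1) = pvStk (j + 1) n ++ [(j : Int) + 1] from rfl]
    simp

theorem pvLoopB_eq (s : List Char) : ∀ (i : Nat) (res : List String),
    (List.range' i (s.length + 1 - i)).foldl (pvStepB s) (res, []) =
    (res ++ (pvEmit s i).map PySem.Int.toStr, []) := by
  suffices H : ∀ (n i : Nat) (res : List String), s.length + 1 - i ≤ n →
      (List.range' i (s.length + 1 - i)).foldl (pvStepB s) (res, []) =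
      (res ++ (pvEmit s i).map PySem.Int.toStr, []) from
    fun i res => H (s.length + 1 - i) i res le_rfl
  intro n
  induction n with
  | zero =>
    intro i res hn
    have hi : s.length < i := by omega
    rw [show s.length + 1 - i = 0 by omega]
    rw [pvEmit, if_neg (by omega), dif_neg (by omega)]
    simp
  | succ n ih =>
  intro i res hn
  rcases lt_trichotomy i s.length with hi | hi | hi
  · by_cases hD : s[i]? = some 'D'
    · -- a run of 'D' is accumulated on the stack, then flushed at its end
      have hd1 : 1 ≤ pvRunD s i := by rw [pvRunD, dif_pos hD]; omega
      have hbd : i + pvRunD s i ≤ s.length := pvRunD_bound s i (by omega)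
      rw [pvRunB s (pvRunD s i) i [] res (by omega) (fun t ht => pvRunD_all s i t ht)]
      rw [show s.length + 1 - (i + pvRunD s i) = (s.length - (i + pvRunD s i)) + 1 by omega,
          List.range'_succ, List.foldl_cons]
      have hcond : i + pvRunD s i = s.length ∨ ¬ PySem.List.pyGet? s ((i + pvRunD s i : Nat) : Int) = some 'D' := by
        rcases Nat.lt_or_ge (i + pvRunD s i) s.length with hlt | hge
        · right; rw [PySem.List.pyGet?_natCast]; exact pvRunD_end s i hlt
        · left; omega
      have hstep : pvStepB s (res, pvStk i (pvRunD s i) ++ []) (i + pvRunD s i)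
          = (res ++ (pvDesc ((i : Int) + 1) (pvRunD s i)).map PySem.Int.toStr, []) := by
        rw [pvStepB, if_pos hcond]
        rw [List.append_nil, pvFlush_eq]
        rw [show (((i + pvRunD s i : Nat) : Int) + 1) :: pvStk i (pvRunD s i)
            = ((i : Int) + 1 + (pvRunD s i : Nat)) :: pvStk i (pvRunD s i) by push_cast; ring_nf]
        rw [pvStk_desc]
      rw [hstep]
      rw [show s.length - (i + pvRunD s i) = s.length + 1 - (i + pvRunD s i + 1) by omega]
      rw [ih (i + pvRunD s i + 1) (res ++ (pvDesc ((i : Int) + 1) (pvRunD s i)).map PySem.Int.toStr) (by omega)]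
      have hDc : s[i] = 'D' := by
        rw [List.getElem?_eq_getElem hi] at hD
        simpa using hD
      have hE : pvEmit s i = pvDesc ((i : Int) + 1) (pvRunD s i) ++ pvEmit s (i + pvRunD s i + 1) := by
        rw [pvEmit, if_neg (by omega), dif_pos hi, if_pos hDc]
      rw [hE]
      simp
    · -- non-'D' position: the stack [i+1] is flushed immediately
      rw [show s.length + 1 - i = (s.length - i) + 1 by omega, List.range'_succ, List.foldl_cons]
      have hstep : pvStepB s (res, []) i = (res ++ [PySem.Int.toStr ((i : Int) + 1)], []) := by
        rw [pvStepB, if_pos (Or.inr (by rw [PySem.List.pyGet?_natCast]; simpa using hD))]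
        rw [pvFlush_eq]
        rfl
      rw [hstep]
      rw [show s.length - i = s.length + 1 - (i + 1) by omega]
      rw [ih (i + 1) (res ++ [PySem.Int.toStr ((i : Int) + 1)]) (by omega)]
      have hDc : ¬ s[i] = 'D' := by
        rw [List.getElem?_eq_getElem hi] at hD
        simpa using hD
      have hE : pvEmit s i = ((i : Int) + 1) :: pvEmit s (i + 1) := by
        rw [pvEmit, if_neg (by omega), dif_pos hi, if_neg hDc]
      rw [hE]
      simp
  · -- i = len(a): the final iteration flushes [len+1]
    rw [show s.length + 1 - i = 1 by omega]
    rw [List.range'_one, List.foldl_cons, List.foldl_nil]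
    rw [pvStepB, if_pos (Or.inl hi), pvFlush_eq]
    rw [pvEmit, if_pos hi]
  · -- i > len(a): nothing left
    rw [show s.length + 1 - i = 0 by omega]
    rw [pvEmit, if_neg (by omega), dif_neg (by omega)]
    simp

theorem pvIntercalate_nil (l : List (List Char)) : List.intercalate [] l = l.flatten := by
  simp only [List.intercalate]
  induction l with
  | nil => simp
  | cons x xs ih => cases xs <;> simp_all [List.intersperse]

-- ===== VERDICT (by name: the statement is the Claim_ definition above) =====
theorem findMinimumNumber_spec : Claim_equal_findMinimumNumber := by
  intro a _
  show findMinimumNumber a = findMinimumNumber_alt a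
  have hA := pvLoopA_eq a.toList (a.toList.length + 1) 0 [] (by omega)
  have hB := pvLoopB_eq a.toList 0 []
  norm_num at hA hB
  have hT : (findMinimumNumber a).toList = (findMinimumNumber_alt a).toList := by
    simp only [findMinimumNumber, findMinimumNumber_alt]
    rw [List.range_eq_range']
    simp only [String.length_toList]
    rw [hB, hA]
    simp [PySem.Str.toList_join, PySem.Chars.join, pvIntercalate_nil, pvRender,
      List.map_map, Function.comp_def, PySem.Int.toList_toStr]
  calc findMinimumNumber a = String.ofList (findMinimumNumber a).toList := String.ofList_toList.symm
    _ = String.ofList (findMinimumNumber_alt a).toList := by rw [hT]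
    _ = findMinimumNumber_alt a := String.ofList_toList
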